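-- pv_equiv track=rewrite | github.com/GeneralVimes/AS32JS | converter.py | strip_prog_token
-- ===== SOURCE A (Python) =====
-- def strip_prog_token(nm):
-- 	var_names_sms="qwertyuiopasdfghjklzxcvbnm0123456789QWERTYUIOPASDFGHJKLZXCVBNM_";
-- 	res=""
-- 	for ch in nm:
-- 		if ch in var_names_sms:
-- 			res+=ch;
-- 		else:
-- 			break;
-- 	return res;
-- ===== SOURCE B (Python) =====
-- import re
--
-- _ID_PREFIX = re.compile(r'[A-Za-z0-9_]*')
--
-- def strip_prog_token(nm):
--     return _ID_PREFIX.match(nm).group(0)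
-- ===== Notes on version B (the rewrite author's own statement) =====
-- stated objective: idiomatic
-- what changed: Replaced the manual char-by-char loop with membership tests against a 63-character constant string by a single anchored greedy regular-expression match [A-Za-z0-9_]* whose group(0) is the maximal leading identifier-character run.
import Mathlib
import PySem

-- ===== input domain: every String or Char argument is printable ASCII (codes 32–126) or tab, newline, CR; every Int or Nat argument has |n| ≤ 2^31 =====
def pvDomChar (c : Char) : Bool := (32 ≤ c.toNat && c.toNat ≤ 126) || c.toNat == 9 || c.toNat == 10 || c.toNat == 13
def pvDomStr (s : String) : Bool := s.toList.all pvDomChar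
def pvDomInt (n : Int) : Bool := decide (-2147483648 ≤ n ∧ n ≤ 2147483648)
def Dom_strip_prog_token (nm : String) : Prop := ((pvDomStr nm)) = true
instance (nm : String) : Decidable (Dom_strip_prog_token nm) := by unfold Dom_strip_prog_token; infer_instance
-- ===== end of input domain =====

-- B replaces A's char loop with membership tests by an anchored greedy regex match [A-Za-z0-9_]* (idiomatic; same result).

-- ===== PORT A =====
-- the constant var_names_sms
def pvVarNamesSms : String := "qwertyuiopasdfghjklzxcvbnm0123456789QWERTYUIOPASDFGHJKLZXCVBNM_"

-- the for-loop with break: recursion over the characters with the accumulator res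
def pvStripGo : List Char → String → String
  | [], res => res
  | ch :: rest, res =>
      if pvVarNamesSms.toList.contains ch then pvStripGo rest (res.push ch) else res

def strip_prog_token (nm : String) : String := pvStripGo nm.toList ""

-- ===== PORT B =====
-- the regex character class [A-Za-z0-9_]
def pvIdChar (c : Char) : Bool :=
  ('A' ≤ c && c ≤ 'Z') || ('a' ≤ c && c ≤ 'z') || ('0' ≤ c && c ≤ '9') || c == '_'

-- anchored greedy match of [A-Za-z0-9_]* : the maximal leading run of class characters
def strip_prog_token_alt (nm : String) : String := String.ofList (nm.toList.takeWhile pvIdChar)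

-- ===== PRECONDITION & SPEC =====
def Spec_strip_prog_token (nm : String) (out : String) : Prop := out = strip_prog_token_alt nm
instance (nm : String) (out : String) : Decidable (Spec_strip_prog_token nm out) := by unfold Spec_strip_prog_token; infer_instance

-- ===== CLAIM (what is proved, stated in full; the proofs are below) =====
def Claim_equal_strip_prog_token : Prop := ∀ (nm : String), Dom_strip_prog_token nm → Spec_strip_prog_token nm (strip_prog_token nm)

-- ===== LEMMAS AND PROOFS =====
set_option maxRecDepth 40000

-- membership in the 63-character constant coincides with the regex class, for every Char
theorem pvMemEq (c : Char) : pvVarNamesSms.toList.contains c = pvIdChar c := by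
  have h : pvVarNamesSms.toList = ['q','w','e','r','t','y','u','i','o','p','a','s','d','f','g','h','j','k','l','z','x','c','v','b','n','m','0','1','2','3','4','5','6','7','8','9','Q','W','E','R','T','Y','U','I','O','P','A','S','D','F','G','H','J','K','L','Z','X','C','V','B','N','M','_'] := by decide
  rw [h, Bool.eq_iff_iff]
  simp [pvIdChar, List.contains_eq_mem, Char.ext_iff, UInt32.ext_iff, Char.le_def,
    UInt32.le_iff_toNat_le]
  omega

theorem pvStripGo_eq (l : List Char) (res : String) :
    pvStripGo l res = String.ofList (res.toList ++ l.takeWhile pvIdChar) := by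
  induction l generalizing res with
  | nil => simp [pvStripGo, String.ofList_toList]
  | cons ch rest ih =>
      rw [pvStripGo, pvMemEq]
      by_cases hc : pvIdChar ch = true
      · simp [hc, ih, List.takeWhile_cons_of_pos hc]
      · rw [if_neg hc, List.takeWhile_cons_of_neg (by simp [hc])]
        simp [String.ofList_toList]

-- ===== VERDICT (by name: the statement is the Claim_ definition above) =====
theorem strip_prog_token_spec : Claim_equal_strip_prog_token := by
  intro nm _
  unfold Spec_strip_prog_token strip_prog_token strip_prog_token_alt
  rw [pvStripGo_eq]
  simp
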